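-- pv_equiv track=rewrite | github.com/sooyun429/TIL_2021 | Algorithm/211020_CLASS101_question3.py | solution
-- ===== SOURCE A (Python) =====
-- def solution(D, T):
--     # write your code in Python 3.6
--
--     typeCheck = ["P", "G", "M"]
--     timeCheck = [0, 0, 0]
--
--     for i in range(len(T)): # "PGP"
--         for j in range(3): # 일치하는 typeCheck 인덱스 확인
--             if typeCheck[j] in T[i]:
--                 distanceCheck = D[i]
--                 if i != 0:
--                     for k in range(i-1, -1, -1):
--                         if typeCheck[j] not in T[k]:
--                             distanceCheck += D[k]
--                         else:
--                             break
--                 timeCheck[j] += (distanceCheck*2 + T[i].count(typeCheck[j]))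
--
--     return max(timeCheck)
-- ===== SOURCE B (Python) =====
-- def solution(D, T):
--     # O(n) pass: prefix sums of D + per-type prefix value at the last occurrence,
--     # instead of A's backward rescan per matching segment.
--     prefix = [0]
--     for d in D:
--         prefix.append(prefix[-1] + d)
--     tp = tg = tm = 0
--     lp = lg = lm = 0
--     for i, s in enumerate(T):
--         if "P" in s:
--             tp += (prefix[i + 1] - lp) * 2 + s.count("P")
--             lp = prefix[i + 1]
--         if "G" in s:
--             tg += (prefix[i + 1] - lg) * 2 + s.count("G")
--             lg = prefix[i + 1]
--         if "M" in s:
--             tm += (prefix[i + 1] - lm) * 2 + s.count("M")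
--             lm = prefix[i + 1]
--     return max(tp, tg, tm)
-- ===== Notes on version B (the rewrite author's own statement) =====
-- stated objective: faster
-- what changed: Replaced A's per-match backward rescan of earlier segments by one prefix-sum array of D plus a per-type 'prefix value at last occurrence' variable, turning the quadratic accumulation into a single pass.
import Mathlib
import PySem

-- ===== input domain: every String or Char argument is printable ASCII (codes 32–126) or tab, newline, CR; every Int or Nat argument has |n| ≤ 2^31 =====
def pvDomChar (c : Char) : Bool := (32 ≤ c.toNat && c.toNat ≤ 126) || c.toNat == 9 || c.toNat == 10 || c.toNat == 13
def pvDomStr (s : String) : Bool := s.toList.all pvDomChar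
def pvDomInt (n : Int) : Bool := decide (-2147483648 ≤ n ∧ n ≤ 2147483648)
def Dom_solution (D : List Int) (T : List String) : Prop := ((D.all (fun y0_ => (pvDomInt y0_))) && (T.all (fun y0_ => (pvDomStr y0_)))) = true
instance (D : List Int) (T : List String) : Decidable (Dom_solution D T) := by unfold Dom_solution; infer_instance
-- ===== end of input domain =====

-- B replaces A's per-match backward rescan with prefix sums of D and per-type last-occurrence
-- prefix values: one pass instead of A's nested rescans; return values agree on Pre_.

-- ===== PORT A =====
-- the backward scan 'for k in range(i-1, -1, -1): add D[k] until the type occurs in T[k]'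
def backScan (c : String) (D : List Int) (T : List String) : Nat → Int
  | 0 => 0
  | k + 1 => if PySem.Str.isIn c (T.getD k "") then 0 else D.getD k 0 + backScan c D T k

-- the body of A's outer loop (the inner 'for j in range(3)')
def bodyA (D : List Int) (T : List String) (tm : List Int) (i : Nat) : List Int :=
  (List.range 3).foldl (fun tm j =>
    let c := (["P", "G", "M"] : List String).getD j ""
    if PySem.Str.isIn c (T.getD i "") then
      let distanceCheck := D.getD i 0 + (if i ≠ 0 then backScan c D T i else 0)
      tm.set j (tm.getD j 0 + (distanceCheck * 2 + (PySem.Str.count (T.getD i "") c : Int)))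
    else tm) tm

def solution (D : List Int) (T : List String) : Int :=
  let timeCheck : List Int := [0, 0, 0]
  let timeCheck := (List.range T.length).foldl (bodyA D T) timeCheck
  ((PySem.List.max? timeCheck (fun x => x)).getD 0)

-- ===== PORT B =====
-- the body of B's loop over enumerate(T); state (tp, tg, tm, lp, lg, lm)
def bodyB (pfx : List Int) (st : Int × Int × Int × Int × Int × Int) (is : Int × String) :
    Int × Int × Int × Int × Int × Int :=
  let (tp, tg, tm, lp, lg, lm) := st
  let (i, s) := is
  let (tp, lp) :=
    if PySem.Str.isIn "P" s then
      (tp + ((PySem.List.pyGet? pfx (i + 1)).getD 0 - lp) * 2 + (PySem.Str.count s "P" : Int),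
       (PySem.List.pyGet? pfx (i + 1)).getD 0)
    else (tp, lp)
  let (tg, lg) :=
    if PySem.Str.isIn "G" s then
      (tg + ((PySem.List.pyGet? pfx (i + 1)).getD 0 - lg) * 2 + (PySem.Str.count s "G" : Int),
       (PySem.List.pyGet? pfx (i + 1)).getD 0)
    else (tg, lg)
  let (tm, lm) :=
    if PySem.Str.isIn "M" s then
      (tm + ((PySem.List.pyGet? pfx (i + 1)).getD 0 - lm) * 2 + (PySem.Str.count s "M" : Int),
       (PySem.List.pyGet? pfx (i + 1)).getD 0)
    else (tm, lm)
  (tp, tg, tm, lp, lg, lm)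

def solution_alt (D : List Int) (T : List String) : Int :=
  let pfx : List Int := D.foldl (fun p d => p ++ [(PySem.List.pyGet? p (-1)).getD 0 + d]) [0]
  let st := (PySem.List.enumerate T).foldl (bodyB pfx) (0, 0, 0, 0, 0, 0)
  max (max st.1 st.2.1) st.2.2.1

-- ===== PRECONDITION & SPEC =====
-- Pre_ excludes exactly the inputs where A raises IndexError: a type letter occurring in T[i]
-- with i out of range for D (there A reads D[i]).
def Pre_solution (D : List Int) (T : List String) : Prop :=
  ∀ i < T.length,
    (PySem.Str.isIn "P" (T.getD i "") || PySem.Str.isIn "G" (T.getD i "") ||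
      PySem.Str.isIn "M" (T.getD i "")) = true → i < D.length
instance (D : List Int) (T : List String) : Decidable (Pre_solution D T) := by
  unfold Pre_solution; infer_instance

def pvWitness_solution : List Int × List String := ([2, 3, 1], ["P", "xG", "PM"])

def Spec_solution (D : List Int) (T : List String) (out : Int) : Prop := out = solution_alt D T
instance (D : List Int) (T : List String) (out : Int) : Decidable (Spec_solution D T out) := by
  unfold Spec_solution; infer_instance

-- ===== CLAIM (what is proved, stated in full; the proofs are below) =====
def Claim_equal_solution : Prop :=
  ∀ (D : List Int) (T : List String), Dom_solution D T → Pre_solution D T →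
    Spec_solution D T (solution D T)

-- ===== LEMMAS AND PROOFS =====

-- prefix sum of the first n entries of D
def psum (D : List Int) (n : Nat) : Int := (D.take n).sum

theorem psum_succ (D : List Int) (n : Nat) : psum D (n + 1) = psum D n + D.getD n 0 := by
  unfold psum
  rcases Nat.lt_or_ge n D.length with h | h
  · rw [List.take_add_one, List.getElem?_eq_getElem h, List.sum_append,
      List.getD_eq_getElem D 0 h]
    simp
  · rw [List.take_of_length_le (by omega), List.take_of_length_le (by omega),
      List.getD_eq_default _ _ h]
    simp

-- B's prefix list is the table of psum D
theorem pfx_eq (D : List Int) :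
    D.foldl (fun p d => p ++ [(PySem.List.pyGet? p (-1)).getD 0 + d]) [0] =
      (List.range (D.length + 1)).map (psum D) := by
  induction D using List.reverseRecOn with
  | nil => simp [psum]
  | append_singleton D d ih =>
    rw [List.foldl_append, ih]
    have hmap : (List.range (D.length + 1)).map (psum (D ++ [d])) =
        (List.range (D.length + 1)).map (psum D) := by
      refine List.map_congr_left ?_
      intro k hk
      rw [List.mem_range] at hk
      unfold psum
      rw [List.take_append_of_le_length (by omega)]
    have hlast : (List.range (D.length + 1)).map (psum D) =
        (List.range D.length).map (psum D) ++ [psum D D.length] := by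
      rw [List.range_succ, List.map_append]; rfl
    simp only [List.foldl_cons, List.foldl_nil, List.length_append, List.length_singleton]
    rw [hlast, PySem.List.pyGet?_neg_one_append_singleton]
    rw [show D.length + 1 + 1 = (D.length + 1) + 1 from rfl, List.range_succ, List.map_append,
      hmap, hlast]
    have : psum (D ++ [d]) (D.length + 1) = psum D D.length + d := by
      unfold psum
      rw [List.take_of_length_le (by simp), List.take_length, List.sum_append]
      simp
    simp [this]

theorem pfx_get (D : List Int) (n : Nat) (h : n < D.length) :
    (PySem.List.pyGet? ((List.range (D.length + 1)).map (psum D)) ((n : Int) + 1)).getD 0 =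
      psum D (n + 1) := by
  rw [show ((n : Int) + 1) = ((n + 1 : Nat) : Int) by push_cast; ring, PySem.List.pyGet?_natCast]
  rw [List.getElem?_map, List.getElem?_range (by omega)]
  rfl

theorem ite_backScan (c : String) (D : List Int) (T : List String) (i : Nat) :
    (if i ≠ 0 then backScan c D T i else 0) = backScan c D T i := by
  cases i <;> simp [backScan]

-- closed form of one iteration of A's outer loop on a 3-element state
theorem bodyA_eval (D : List Int) (T : List String) (i : Nat) (x y z : Int) :
    bodyA D T [x, y, z] i =
      [if PySem.Str.isIn "P" (T.getD i "") then
         x + ((D.getD i 0 + backScan "P" D T i) * 2 + (PySem.Str.count (T.getD i "") "P" : Int)) else x,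
       if PySem.Str.isIn "G" (T.getD i "") then
         y + ((D.getD i 0 + backScan "G" D T i) * 2 + (PySem.Str.count (T.getD i "") "G" : Int)) else y,
       if PySem.Str.isIn "M" (T.getD i "") then
         z + ((D.getD i 0 + backScan "M" D T i) * 2 + (PySem.Str.count (T.getD i "") "M" : Int)) else z] := by
  unfold bodyA
  rw [show List.range 3 = [0, 1, 2] from rfl]
  have e0 : (["P", "G", "M"] : List String).getD 0 "" = "P" := rfl
  have e1 : (["P", "G", "M"] : List String).getD 1 "" = "G" := rfl
  have e2 : (["P", "G", "M"] : List String).getD 2 "" = "M" := rfl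
  simp only [List.foldl_cons, List.foldl_nil, e0, e1, e2, ite_backScan]
  split_ifs <;> simp [List.set, List.getD]

-- closed form of one iteration of B's loop
theorem bodyB_eval (pfx : List Int) (i : Int) (s : String)
    (tp tg tm lp lg lm : Int) :
    bodyB pfx (tp, tg, tm, lp, lg, lm) (i, s) =
      (if PySem.Str.isIn "P" s then
         tp + ((PySem.List.pyGet? pfx (i + 1)).getD 0 - lp) * 2 + (PySem.Str.count s "P" : Int) else tp,
       if PySem.Str.isIn "G" s then
         tg + ((PySem.List.pyGet? pfx (i + 1)).getD 0 - lg) * 2 + (PySem.Str.count s "G" : Int) else tg,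
       if PySem.Str.isIn "M" s then
         tm + ((PySem.List.pyGet? pfx (i + 1)).getD 0 - lm) * 2 + (PySem.Str.count s "M" : Int) else tm,
       if PySem.Str.isIn "P" s then (PySem.List.pyGet? pfx (i + 1)).getD 0 else lp,
       if PySem.Str.isIn "G" s then (PySem.List.pyGet? pfx (i + 1)).getD 0 else lg,
       if PySem.Str.isIn "M" s then (PySem.List.pyGet? pfx (i + 1)).getD 0 else lm) := by
  unfold bodyB
  by_cases h1 : PySem.Str.isIn "P" s = true <;>
    by_cases h2 : PySem.Str.isIn "G" s = true <;>
      by_cases h3 : PySem.Str.isIn "M" s = true <;>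
        simp_all

-- main loop invariant: A's partial sums and B's state coincide, and B's 'last' variables
-- encode A's backward scans: backScan c D T n = psum D n - l_c
theorem loop_inv (D : List Int) (T : List String) (pre : Pre_solution D T) :
    ∀ n, n ≤ T.length →
      ∃ x y z lp lg lm : Int,
        (List.range n).foldl (bodyA D T) [0, 0, 0] = [x, y, z] ∧
        (PySem.List.enumerate (T.take n)).foldl
            (bodyB ((List.range (D.length + 1)).map (psum D))) (0, 0, 0, 0, 0, 0) =
          (x, y, z, lp, lg, lm) ∧
        backScan "P" D T n = psum D n - lp ∧
        backScan "G" D T n = psum D n - lg ∧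
        backScan "M" D T n = psum D n - lm := by
  intro n
  induction n with
  | zero =>
    intro _
    exact ⟨0, 0, 0, 0, 0, 0, by simp, by simp, by simp [backScan, psum],
      by simp [backScan, psum], by simp [backScan, psum]⟩
  | succ n ih =>
    intro hn
    have hnT : n < T.length := by omega
    obtain ⟨x, y, z, lp, lg, lm, hA, hB, hP, hG, hM⟩ := ih (by omega)
    have hTn : T.getD n "" = T[n] := List.getD_eq_getElem T "" hnT
    set g : Int :=
      (PySem.List.pyGet? ((List.range (D.length + 1)).map (psum D)) ((n : Int) + 1)).getD 0 with hgdef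
    -- unfold one more step of each loop
    rw [List.range_succ, List.foldl_append, hA]
    have htake : T.take (n + 1) = T.take n ++ [T[n]] := by
      rw [List.take_add_one, List.getElem?_eq_getElem hnT]; rfl
    rw [htake, PySem.List.enumerate_append, List.foldl_append, hB]
    simp only [List.length_take, Nat.min_eq_left (Nat.le_of_lt hnT), PySem.List.enumerate,
      List.foldl_cons, List.foldl_nil]
    rw [bodyA_eval]
    rw [show ((0 : Int) + (n : Int)) = (n : Int) by ring]
    rw [bodyB_eval]
    -- if a type letter occurs in T[n], then n is in range for D (Pre_)
    have hrange : ∀ c : String, c = "P" ∨ c = "G" ∨ c = "M" →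
        PySem.Str.isIn c T[n] = true → n < D.length := by
      intro c hc hin
      apply pre n hnT
      rcases hc with h | h | h <;> subst h <;> rw [hTn] <;> revert hin <;> simp <;> tauto
    -- the matched-segment values agree
    have key : ∀ c : String, ∀ l : Int, backScan c D T n = psum D n - l →
        c = "P" ∨ c = "G" ∨ c = "M" → PySem.Str.isIn c T[n] = true →
        (D.getD n 0 + backScan c D T n) * 2 = (g - l) * 2 := by
      intro c l hl hc hin
      rw [hgdef, pfx_get D n (hrange c hc hin), hl, psum_succ]
      ring
    -- new backScan values
    have hback : ∀ c : String, ∀ l : Int, backScan c D T n = psum D n - l →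
        c = "P" ∨ c = "G" ∨ c = "M" →
        backScan c D T (n + 1) =
          psum D (n + 1) - (if PySem.Str.isIn c T[n] then g else l) := by
      intro c l hl hc
      rw [show backScan c D T (n + 1) = (if PySem.Str.isIn c (T.getD n "") then 0
          else D.getD n 0 + backScan c D T n) from rfl, hTn]
      split_ifs with hin
      · rw [hgdef, pfx_get D n (hrange c hc hin)]
        ring
      · rw [hl, psum_succ]
        ring
    refine ⟨_, _, _, _, _, _, rfl, ?_, hback "P" lp hP (Or.inl rfl),
      hback "G" lg hG (Or.inr (Or.inl rfl)), hback "M" lm hM (Or.inr (Or.inr rfl))⟩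
    simp only [Prod.mk.injEq, hTn]
    refine ⟨?_, ?_, ?_, rfl, rfl, rfl⟩
    · by_cases h : PySem.Str.isIn "P" T[n] = true <;>
        simp only [h, if_true, if_false, Bool.false_eq_true]
      rw [key "P" lp hP (Or.inl rfl) h]
      ring
    · by_cases h : PySem.Str.isIn "G" T[n] = true <;>
        simp only [h, if_true, if_false, Bool.false_eq_true]
      rw [key "G" lg hG (Or.inr (Or.inl rfl)) h]
      ring
    · by_cases h : PySem.Str.isIn "M" T[n] = true <;>
        simp only [h, if_true, if_false, Bool.false_eq_true]
      rw [key "M" lm hM (Or.inr (Or.inr rfl)) h]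
      ring

-- ===== VERDICT (by name: the statement is the Claim_ definition above) =====
theorem solution_spec : Claim_equal_solution := by
  intro D T _ pre
  unfold Spec_solution solution solution_alt
  obtain ⟨x, y, z, lp, lg, lm, hA, hB, -⟩ := loop_inv D T pre T.length (le_refl _)
  rw [pfx_eq]
  rw [List.take_length] at hB
  simp only [hA, hB, PySem.List.max?_id_cons, List.foldl_cons, List.foldl_nil, Option.getD_some]
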